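-- pv_equiv track=rewrite | github.com/KacperM33/Data-Scraper-for-Neo4J-Graph-Database | scraper2.py | find_country_name
-- ===== SOURCE A (Python) =====
-- def find_country_name(word, country_dict):
--     prefix_length = 1
--     while prefix_length <= len(word):
--         prefix = word[:prefix_length].upper()
--         matches = [country for country in country_dict if country[:prefix_length].upper() == prefix]
--
--         if len(matches) == 1:
--             return matches[0]
--         elif len(matches) == 0:
--             break
--
--         prefix_length += 1
--
--     return None
-- ===== SOURCE B (Python) =====
-- def find_country_name(word, country_dict):
--     # Incremental filtering: keep (key, unmatched suffix) pairs and compare one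
--     # character per round instead of re-slicing and re-comparing whole prefixes.
--     candidates = [(c, c) for c in country_dict]
--     for ch in word.upper():
--         candidates = [(c, rest[1:]) for (c, rest) in candidates
--                       if rest and rest[0].upper() == ch]
--         if len(candidates) == 1:
--             return candidates[0][0]
--         if not candidates:
--             return None
--     return None
-- ===== Notes on version B (the rewrite author's own statement) =====
-- stated objective: faster
-- what changed: Instead of re-slicing and re-comparing whole length-L uppercased prefixes of every dict key on every loop round, B uppercases the word once and incrementally narrows a candidate list of (key, unmatched-suffix) pairs, comparing exactly one new character per surviving candidate per round.
import Mathlib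
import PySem

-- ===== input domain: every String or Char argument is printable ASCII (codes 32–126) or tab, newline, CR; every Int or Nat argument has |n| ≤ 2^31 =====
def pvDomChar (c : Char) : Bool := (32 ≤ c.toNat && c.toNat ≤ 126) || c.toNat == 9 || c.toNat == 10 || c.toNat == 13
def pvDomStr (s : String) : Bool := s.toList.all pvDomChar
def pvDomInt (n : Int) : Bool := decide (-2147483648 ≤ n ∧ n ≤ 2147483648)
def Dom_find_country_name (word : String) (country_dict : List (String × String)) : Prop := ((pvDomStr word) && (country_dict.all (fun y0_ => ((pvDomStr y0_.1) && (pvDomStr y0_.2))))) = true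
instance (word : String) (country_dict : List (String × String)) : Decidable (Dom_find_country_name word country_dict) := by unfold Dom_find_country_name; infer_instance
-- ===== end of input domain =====

-- B replaces A's re-slicing and re-comparing of whole length-L prefixes on every round by an
-- incrementally filtered candidate list that compares ONE new character per round (objective: faster).

-- ===== PORT A =====
-- A's per-country test at prefix length L: country[:L].upper() == word[:L].upper()
def pA (word : String) (L : Nat) (c : String) : Bool :=
  PySem.Str.upper (PySem.Str.slice c none (some (L : Int))) ==
    PySem.Str.upper (PySem.Str.slice word none (some (L : Int)))

-- the while-loop; fuel = number of remaining iterations (len(word) + 1 - prefix_length),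
-- so fuel = 0 is exactly the exit of 'while prefix_length <= len(word)'
def find_country_name_go (word : String) (keys : List String) (L : Nat) : Nat → Option String
  | 0 => none
  | fuel + 1 =>
    let ms := keys.filter (pA word L)
    if ms.length = 1 then PySem.List.pyGet? ms 0
    else if ms.length = 0 then none
    else find_country_name_go word keys (L + 1) fuel

-- 'for country in country_dict' iterates the dict's (distinct) keys in insertion order
def find_country_name (word : String) (country_dict : List (String × String)) : Option String :=
  find_country_name_go word (PySem.List.dedup (country_dict.map Prod.fst)) 1
    (PySem.Str.len word).toNat

-- ===== PORT B =====
-- the for-loop over word.upper(); cands holds (key, still-unmatched suffix) pairs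
def find_country_name_alt_go (cands : List (String × List Char)) : List Char → Option String
  | [] => none
  | ch :: w =>
    let cands' := cands.filterMap (fun p =>
      match p.2 with
      | [] => none
      | r :: rest => if PySem.Chars.upperChar r == ch then some (p.1, rest) else none)
    if cands'.length = 1 then cands'.head?.map Prod.fst
    else if cands'.length = 0 then none
    else find_country_name_alt_go cands' w

def find_country_name_alt (word : String) (country_dict : List (String × String)) : Option String :=
  find_country_name_alt_go
    ((PySem.List.dedup (country_dict.map Prod.fst)).map (fun c => (c, c.toList)))
    (PySem.Chars.upper word.toList)

-- ===== PRECONDITION & SPEC =====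
def Spec_find_country_name (word : String) (country_dict : List (String × String)) (out : Option String) : Prop := out = find_country_name_alt word country_dict
instance (word : String) (country_dict : List (String × String)) (out : Option String) : Decidable (Spec_find_country_name word country_dict out) := by unfold Spec_find_country_name; infer_instance

-- ===== CLAIM (what is proved, stated in full; the proofs are below) =====
def Claim_equal_find_country_name : Prop := ∀ (word : String) (country_dict : List (String × String)), Dom_find_country_name word country_dict → Spec_find_country_name word country_dict (find_country_name word country_dict)

-- ===== LEMMAS AND PROOFS =====

lemma str_beq (a b : String) : (a == b) = decide (a.toList = b.toList) := by
  rw [Bool.eq_iff_iff, beq_iff_eq, decide_eq_true_eq, String.toList_inj]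

-- A's prefix test, characterised on uppercased char lists
lemma pA_eq (word : String) (L : Nat) (c : String) :
    pA word L c =
      decide ((c.toList.map PySem.Chars.upperChar).take L
        = (word.toList.map PySem.Chars.upperChar).take L) := by
  unfold pA
  rw [str_beq]
  rw [decide_eq_decide]
  rw [PySem.Str.toList_upper, PySem.Str.toList_upper, PySem.Str.toList_slice, PySem.Str.toList_slice]
  show PySem.Chars.upper (PySem.List.slice _ none (some (L:Int))) = PySem.Chars.upper (PySem.List.slice _ none (some (L:Int))) ↔ _
  rw [PySem.List.slice_to_natCast, PySem.List.slice_to_natCast]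
  show (c.toList.take L).map PySem.Chars.upperChar = (word.toList.take L).map PySem.Chars.upperChar ↔ _
  rw [List.map_take, List.map_take]

-- pointwise: passing A's test at L = i+1 is passing it at i plus matching the one new character
lemma point (word c : String) (i : Nat) (hi : i < word.toList.length) :
    (if pA word i c = true then
      (match c.toList.drop i with
       | [] => none
       | r :: rest =>
         if PySem.Chars.upperChar r == (word.toList.map PySem.Chars.upperChar)[i]'(by
             rw [List.length_map]; exact hi) then
           some (c, rest) else none)
     else none)
    = if pA word (i+1) c = true then some (c, c.toList.drop (i+1)) else none := by
  rw [pA_eq, pA_eq]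
  simp only [decide_eq_true_eq]
  rcases h : c.toList.drop i with _ | ⟨r, rest⟩
  · have hlen : c.toList.length ≤ i := List.drop_eq_nil_iff.mp h
    have hne : ¬ ((c.toList.map PySem.Chars.upperChar).take (i+1)
        = (word.toList.map PySem.Chars.upperChar).take (i+1)) := by
      intro he
      have := congrArg List.length he
      rw [List.length_take, List.length_take, List.length_map, List.length_map] at this
      omega
    rw [if_neg hne]
    split <;> rfl
  · have hlt : i < c.toList.length := by
      by_contra hc
      rw [List.drop_eq_nil_iff.mpr (by omega)] at h
      exact (List.cons_ne_nil r rest) h.symm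
    have hKi : (c.toList.map PySem.Chars.upperChar)[i]? = some (PySem.Chars.upperChar r) := by
      rw [← List.head?_drop, ← List.map_drop, h]
      rfl
    have hWi : (word.toList.map PySem.Chars.upperChar)[i]? =
        some ((word.toList.map PySem.Chars.upperChar)[i]'(by rw [List.length_map]; exact hi)) :=
      List.getElem?_eq_getElem _
    have hrest : c.toList.drop (i+1) = rest := by
      rw [← List.tail_drop, h]
      rfl
    have hiff : ((c.toList.map PySem.Chars.upperChar).take (i+1)
          = (word.toList.map PySem.Chars.upperChar).take (i+1)) ↔
        ((c.toList.map PySem.Chars.upperChar).take i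
            = (word.toList.map PySem.Chars.upperChar).take i ∧
          PySem.Chars.upperChar r
            = (word.toList.map PySem.Chars.upperChar)[i]'(by rw [List.length_map]; exact hi)) := by
      rw [List.take_add_one, List.take_add_one, hKi, hWi]
      rw [List.append_eq_append_iff_of_size_eq_left (by
        rw [List.length_take, List.length_take, List.length_map, List.length_map]; omega)]
      simp
    by_cases h1 : (c.toList.map PySem.Chars.upperChar).take i
        = (word.toList.map PySem.Chars.upperChar).take i
    · rw [if_pos h1]
      by_cases h2 : PySem.Chars.upperChar r
          = (word.toList.map PySem.Chars.upperChar)[i]'(by rw [List.length_map]; exact hi)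
      · rw [if_pos (hiff.mpr ⟨h1, h2⟩), hrest]
        simp [h2]
      · rw [if_neg (fun he => h2 (hiff.mp he).2)]
        rw [List.getElem_map] at h2
        simp [h2]
    · rw [if_neg h1, if_neg (fun he => h1 (hiff.mp he).1)]

-- one filtering round: B's one-char refinement of A's survivors at i = A's survivors at i+1
lemma cands_step (word : String) (keys : List String) (i : Nat)
    (hi : i < word.toList.length) :
    ((keys.filter (pA word i)).map (fun c => (c, c.toList.drop i))).filterMap (fun p =>
        match p.2 with
        | [] => none
        | r :: rest =>
          if PySem.Chars.upperChar r ==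
              (word.toList.map PySem.Chars.upperChar)[i]'(by rw [List.length_map]; exact hi) then
            some (p.1, rest) else none)
      = (keys.filter (pA word (i + 1))).map (fun c => (c, c.toList.drop (i + 1))) := by
  rw [List.filterMap_map, List.filterMap_filter]
  rw [show (keys.filter (pA word (i+1))).map (fun c => (c, c.toList.drop (i+1)))
      = (keys.filter (pA word (i+1))).filterMap (fun c => some (c, c.toList.drop (i+1))) by
    simp]
  rw [List.filterMap_filter]
  exact List.filterMap_congr fun c _ => point word c i hi

-- loop invariant: after i rounds B's candidates are exactly A's survivors at prefix length i
lemma go_eq (word : String) (keys : List String) :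
    ∀ (w : List Char) (i : Nat),
      i + w.length = word.toList.length →
      w = (word.toList.map PySem.Chars.upperChar).drop i →
      find_country_name_go word keys (i + 1) w.length
        = find_country_name_alt_go
            ((keys.filter (pA word i)).map (fun c => (c, c.toList.drop i))) w
  | [], i, hlen, hw => by
    simp [find_country_name_go, find_country_name_alt_go]
  | ch :: w', i, hlen, hw => by
    have hi : i < word.toList.length := by
      simp only [List.length_cons] at hlen; omega
    have hch : ch = (word.toList.map PySem.Chars.upperChar)[i]'(by
        rw [List.length_map]; exact hi) := by
      have h0 : (word.toList.map PySem.Chars.upperChar)[i]? = some ch := by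
        rw [← List.head?_drop, ← hw]; rfl
      rw [List.getElem?_eq_getElem (by rw [List.length_map]; exact hi)] at h0
      exact (Option.some_inj.mp h0).symm
    have hw' : w' = (word.toList.map PySem.Chars.upperChar).drop (i + 1) := by
      rw [← List.tail_drop, ← hw]
      rfl
    have hlen' : (i + 1) + w'.length = word.toList.length := by
      simp only [List.length_cons] at hlen; omega
    show find_country_name_go word keys (i + 1) (w'.length + 1) = _
    simp only [find_country_name_go, find_country_name_alt_go]
    rw [hch, cands_step word keys i hi]
    rw [List.length_map]
    by_cases h1 : (keys.filter (pA word (i+1))).length = 1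
    · rw [if_pos h1, if_pos h1]
      rcases hf : keys.filter (pA word (i+1)) with _ | ⟨x, xs⟩
      · rw [hf] at h1; simp at h1
      · simp [PySem.List.pyGet?, PySem.List.pyIdx?]
    · rw [if_neg h1, if_neg h1]
      by_cases h0 : (keys.filter (pA word (i+1))).length = 0
      · rw [if_pos h0, if_pos h0]
      · rw [if_neg h0, if_neg h0]
        exact go_eq word keys w' (i + 1) hlen' hw'

-- ===== VERDICT (by name: the statement is the Claim_ definition above) =====
theorem find_country_name_spec : Claim_equal_find_country_name := by
  intro word cd _
  unfold Spec_find_country_name find_country_name find_country_name_alt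
  have hfil : (PySem.List.dedup (cd.map Prod.fst)).filter (pA word 0)
      = PySem.List.dedup (cd.map Prod.fst) :=
    List.filter_eq_self.mpr (fun c _ => by rw [pA_eq]; simp)
  have h := go_eq word (PySem.List.dedup (cd.map Prod.fst))
    (word.toList.map PySem.Chars.upperChar) 0
    (by rw [List.length_map]; omega) (by rw [List.drop_zero])
  rw [hfil] at h
  simp only [List.drop_zero] at h
  rw [PySem.Str.len_eq, Int.toNat_natCast]
  rw [show word.toList.length = (word.toList.map PySem.Chars.upperChar).length by
    rw [List.length_map]]
  rw [zero_add] at h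
  exact h
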